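-- pv_equiv track=rewrite | github.com/CRAJKUMARSINGH/BillGeneratorContractor | modules/completeness_checker.py | _find_sequential_gaps
-- ===== SOURCE A (Python) =====
-- from typing import List, Dict, Tuple, Optional
--
-- def _find_sequential_gaps(codes: List[str]) -> List[str]:
--     """
--     Find gaps in sequential BSR codes
--
--     Example: If we have 1.1, 1.2, 1.4, 1.5
--     Gap detected: 1.3 is missing
--     """
--     gaps = []
--
--     # Group codes by major number
--     code_groups = {}
--     for code in codes:
--         if not code:
--             continue
--
--         parts = code.split('.')
--         if len(parts) >= 2:
--             major = parts[0]
--             try: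
--                 minor = int(parts[1])
--                 if major not in code_groups:
--                     code_groups[major] = []
--                 code_groups[major].append(minor)
--             except ValueError:
--                 continue
--
--     # Check for gaps in each group
--     for major, minors in code_groups.items():
--         if len(minors) < 2:
--             continue
--
--         minors.sort()
--         for i in range(len(minors) - 1):
--             current = minors[i]
--             next_val = minors[i + 1]
--
--             # If gap > 1, there might be missing items
--             if next_val - current > 1:
--                 for missing in range(current + 1, next_val):
--                     gaps.append(f"{major}.{missing}")
--
--     return gaps[:10]  # Limit to 10 gaps
-- ===== SOURCE B (Python) =====
-- from typing import List
--
--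
-- def _find_sequential_gaps(codes: List[str]) -> List[str]:
--     # Group minors into a set per major (insertion order of majors preserved),
--     # then sweep range(min+1, max) per group with membership tests.
--     groups = {}
--     for code in codes:
--         if not code:
--             continue
--         parts = code.split('.')
--         if len(parts) < 2:
--             continue
--         try:
--             minor = int(parts[1])
--         except ValueError:
--             continue
--         groups.setdefault(parts[0], set()).add(minor)
--
--     gaps = []
--     for major, minors in groups.items():
--         lo, hi = min(minors), max(minors)
--         for v in range(lo + 1, hi):
--             if v not in minors:
--                 gaps.append(f"{major}.{v}")
--     return gaps[:10]
-- ===== Notes on version B (the rewrite author's own statement) =====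
-- stated objective: alternative
-- what changed: Groups minors into per-major sets and finds gaps by sweeping range(min+1,max) with set-membership tests, instead of sorting each group's list and differencing adjacent pairs.
import Mathlib
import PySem

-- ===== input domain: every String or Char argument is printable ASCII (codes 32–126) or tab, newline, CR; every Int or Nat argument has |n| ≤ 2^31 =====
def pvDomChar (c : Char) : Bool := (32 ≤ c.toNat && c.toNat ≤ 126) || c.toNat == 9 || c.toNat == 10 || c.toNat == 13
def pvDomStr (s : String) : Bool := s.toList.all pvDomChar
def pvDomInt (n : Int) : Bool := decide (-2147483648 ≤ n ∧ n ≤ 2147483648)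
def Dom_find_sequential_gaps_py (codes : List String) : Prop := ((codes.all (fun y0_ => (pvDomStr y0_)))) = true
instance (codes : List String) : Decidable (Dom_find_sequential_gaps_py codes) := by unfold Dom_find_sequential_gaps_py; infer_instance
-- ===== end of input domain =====

-- B replaces A's per-group sort + adjacent-pair differencing by per-major sets swept with
-- range(min+1, max) membership tests (objective: alternative decomposition, same return value).

-- ===== PORT A =====
-- A's grouping loop body: one `code` parsed and appended into the dict of minor lists
def pvGroupA (d : PySem.Dict String (List Int)) (code : String) : PySem.Dict String (List Int) :=
  if code = "" then d
  else
    match PySem.Str.split? code "." with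
    | some (major :: minorStr :: _) =>
        match PySem.Int.ofStr? minorStr with
        | some minor => d.modify major [] (fun l => l ++ [minor])
        | none => d
    | _ => d

-- A's inner gap scan: `for i in range(len(minors)-1)` over the sorted list, as adjacent-pair recursion
def pvGapsScanA (major : String) : List Int → List String
  | a :: b :: rest =>
      (if b - a > 1 then
        (PySem.List.pyRange (a + 1) b 1).map (fun missing => major ++ "." ++ PySem.Int.toStr missing)
      else [])
        ++ pvGapsScanA major (b :: rest)
  | _ => []

def find_sequential_gaps_py (codes : List String) : List String :=
  let code_groups := codes.foldl pvGroupA PySem.Dict.empty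
  let gaps := code_groups.items.foldl (fun gaps p =>
      if p.2.length < 2 then gaps
      else gaps ++ pvGapsScanA p.1 (PySem.List.sorted p.2 (fun x => x) false)) []
  PySem.List.slice gaps none (some 10)

-- ===== PORT B =====
-- Source B's grouping loop body: groups.setdefault(parts[0], set()).add(minor)
def pvGroupB (d : PySem.Dict String (PySem.Set Int)) (code : String) : PySem.Dict String (PySem.Set Int) :=
  if code = "" then d
  else
    match PySem.Str.split? code "." with
    | some (major :: minorStr :: _) =>
        match PySem.Int.ofStr? minorStr with
        | some minor => d.modify major PySem.Set.empty (fun s => PySem.Set.add s minor)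
        | none => d
    | _ => d

-- Source B's range sweep over one group; the `match` only makes min/max total (every stored set is nonempty)
def pvGapsB (major : String) (minors : PySem.Set Int) (gaps : List String) : List String :=
  match PySem.List.min? minors (fun x => x), PySem.List.max? minors (fun x => x) with
  | some lo, some hi =>
      (PySem.List.pyRange (lo + 1) hi 1).foldl (fun gaps v =>
        if PySem.Set.contains minors v then gaps
        else gaps ++ [major ++ "." ++ PySem.Int.toStr v]) gaps
  | _, _ => gaps

def find_sequential_gaps_py_alt (codes : List String) : List String :=
  let groups := codes.foldl pvGroupB PySem.Dict.empty
  let gaps := groups.items.foldl (fun gaps p => pvGapsB p.1 p.2 gaps) []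
  PySem.List.slice gaps none (some 10)

-- ===== PRECONDITION & SPEC =====
def Spec_find_sequential_gaps_py (codes : List String) (out : List String) : Prop := out = find_sequential_gaps_py_alt codes
instance (codes : List String) (out : List String) : Decidable (Spec_find_sequential_gaps_py codes out) := by unfold Spec_find_sequential_gaps_py; infer_instance

-- ===== CLAIM (what is proved, stated in full; the proofs are below) =====
def Claim_equal_find_sequential_gaps_py : Prop := ∀ (codes : List String), Dom_find_sequential_gaps_py codes → Spec_find_sequential_gaps_py codes (find_sequential_gaps_py codes)

-- ===== LEMMAS AND PROOFS =====

-- relation between A's dict of minor lists and B's dict of minor sets: same keys in the same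
-- order, B's value at a key is set() of A's value there
def pvRel (d : PySem.Dict String (List Int)) (d' : PySem.Dict String (PySem.Set Int)) : Prop :=
  d'.items = d.items.map (fun p => (p.1, PySem.Set.ofList p.2))

theorem pv_get?_rel {d : PySem.Dict String (List Int)} {d' : PySem.Dict String (PySem.Set Int)}
    (h : pvRel d d') (k : String) : d'.get? k = (d.get? k).map PySem.Set.ofList := by
  unfold pvRel at h
  simp only [PySem.Dict.get?, h, List.find?_map, Option.map_map]
  congr 1

theorem pv_contains_rel {d : PySem.Dict String (List Int)} {d' : PySem.Dict String (PySem.Set Int)}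
    (h : pvRel d d') (k : String) : d'.contains k = d.contains k := by
  rw [PySem.Dict.contains_eq_isSome_get?, PySem.Dict.contains_eq_isSome_get?, pv_get?_rel h]
  cases d.get? k <;> simp

theorem pv_getD_rel {d : PySem.Dict String (List Int)} {d' : PySem.Dict String (PySem.Set Int)}
    (h : pvRel d d') (k : String) :
    d'.getD k PySem.Set.empty = PySem.Set.ofList (d.getD k []) := by
  rw [PySem.Dict.getD_eq_get?_getD, PySem.Dict.getD_eq_get?_getD, pv_get?_rel h]
  cases d.get? k <;> simp

theorem pvRel_insert {d : PySem.Dict String (List Int)} {d' : PySem.Dict String (PySem.Set Int)}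
    (h : pvRel d d') (k : String) (w : List Int) :
    pvRel (d.insert k w) (d'.insert k (PySem.Set.ofList w)) := by
  unfold pvRel
  rw [PySem.Dict.items_insert, PySem.Dict.items_insert, pv_contains_rel h, h]
  split
  · rw [List.map_map, List.map_map]
    apply List.map_congr_left
    intro p _
    by_cases hp : p.1 = k <;> simp [hp]
  · simp

theorem pv_ofList_append (l : List Int) (v : Int) :
    PySem.Set.ofList (l ++ [v]) = PySem.Set.add (PySem.Set.ofList l) v := by
  simp [PySem.Set.ofList_eq_foldl, List.foldl_append]

theorem pvRel_group {d : PySem.Dict String (List Int)} {d' : PySem.Dict String (PySem.Set Int)}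
    (h : pvRel d d') (code : String) : pvRel (pvGroupA d code) (pvGroupB d' code) := by
  unfold pvGroupA pvGroupB
  split_ifs with hc
  · exact h
  · cases hsp : PySem.Str.split? code "." with
    | none => exact h
    | some parts =>
        match parts with
        | [] => exact h
        | [x] => exact h
        | major :: minorStr :: rest =>
            cases hof : PySem.Int.ofStr? minorStr with
            | none => simp only [hof]; exact h
            | some minor =>
                simp only [hof]
                show pvRel (d.insert major (d.getD major [] ++ [minor]))
                  (d'.insert major (PySem.Set.add (d'.getD major PySem.Set.empty) minor))
                rw [pv_getD_rel h, ← pv_ofList_append]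
                exact pvRel_insert h major _

theorem pvRel_fold (codes : List String) (d : PySem.Dict String (List Int))
    (d' : PySem.Dict String (PySem.Set Int)) (h : pvRel d d') :
    pvRel (codes.foldl pvGroupA d) (codes.foldl pvGroupB d') := by
  induction codes generalizing d d' with
  | nil => exact h
  | cons c rest ih => exact ih _ _ (pvRel_group h c)

-- B's append-if foldl, written as filter + map
theorem pv_gapsB_foldl (major : String) (minors : PySem.Set Int) (xs : List Int) (gaps : List String) :
    xs.foldl (fun gaps v =>
        if PySem.Set.contains minors v then gaps
        else gaps ++ [major ++ "." ++ PySem.Int.toStr v]) gaps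
      = gaps ++ (xs.filter (fun v => !(PySem.Set.contains minors v))).map
          (fun v => major ++ "." ++ PySem.Int.toStr v) := by
  induction xs generalizing gaps with
  | nil => simp
  | cons x t ih =>
      simp only [List.foldl_cons, List.filter_cons]
      by_cases hx : PySem.Set.contains minors x
      · rw [if_pos hx, ih, hx]
        simp
      · rw [if_neg hx, ih, Bool.eq_false_iff.mpr hx]
        simp

-- the last element of a ≤-sorted list is an upper bound
theorem pv_le_getLast (s : List Int) (hs : s.Pairwise (· ≤ ·)) (hne : s ≠ []) :
    ∀ y ∈ s, y ≤ s.getLast hne := by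
  induction s with
  | nil => simp at hne
  | cons x t ih =>
      intro y hy
      cases t with
      | nil => simp at hy; simp [hy]
      | cons z r =>
          rw [List.getLast_cons (by simp)]
          rcases List.mem_cons.mp hy with rfl | hy'
          · calc y ≤ z := (List.pairwise_cons.mp hs).1 z (by simp)
              _ ≤ (z :: r).getLast (by simp) := ih (List.pairwise_cons.mp hs).2 (by simp) z (by simp)
          · exact ih (List.pairwise_cons.mp hs).2 (by simp) y hy'

-- core: A's adjacent-pair gap scan of a ≤-sorted list = the filtered range sweep head+1 .. last
theorem pv_scan_core (major : String) :
    ∀ (t : List Int) (x : Int), (x :: t).Pairwise (· ≤ ·) →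
    pvGapsScanA major (x :: t) =
      ((PySem.List.pyRange (x + 1) ((x :: t).getLast (List.cons_ne_nil x t)) 1).filter
        (fun v => !((x :: t).contains v))).map (fun v => major ++ "." ++ PySem.Int.toStr v) := by
  intro t
  induction t with
  | nil =>
      intro x _
      simp only [List.getLast_singleton]
      rw [PySem.List.pyRange_one_eq_nil (show x ≤ x + 1 by omega)]
      simp [pvGapsScanA]
  | cons y r ih =>
      intro x hp
      have hp' : (y :: r).Pairwise (· ≤ ·) := (List.pairwise_cons.mp hp).2
      have hxy : x ≤ y := (List.pairwise_cons.mp hp).1 y (by simp)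
      have hyr : ∀ z ∈ r, y ≤ z := (List.pairwise_cons.mp hp').1
      have hyL : y ≤ (y :: r).getLast (List.cons_ne_nil y r) :=
        pv_le_getLast _ hp' _ y (by simp)
      have hgl : (x :: y :: r).getLast (List.cons_ne_nil _ _) = (y :: r).getLast (List.cons_ne_nil y r) :=
        List.getLast_cons _
      have hstep : pvGapsScanA major (x :: y :: r) =
          (if y - x > 1 then (PySem.List.pyRange (x + 1) y 1).map (fun v => major ++ "." ++ PySem.Int.toStr v) else [])
            ++ pvGapsScanA major (y :: r) := rfl
      rw [hstep, ih y hp', hgl]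
      -- extending the contains-test with x changes nothing on range(y+1, L)
      have hfc : ((PySem.List.pyRange (y + 1) ((y :: r).getLast (List.cons_ne_nil y r)) 1).filter
            (fun v => !((y :: r).contains v)))
          = ((PySem.List.pyRange (y + 1) ((y :: r).getLast (List.cons_ne_nil y r)) 1).filter
            (fun v => !((x :: y :: r).contains v))) := by
        apply List.filter_congr
        intro v hv
        have hv' := PySem.List.mem_pyRange_one.mp hv
        simp
        intro _ _
        omega
      rw [hfc]
      -- the if-part is the filtered range (x+1, y)
      have hif : (if y - x > 1 then (PySem.List.pyRange (x + 1) y 1).map (fun v => major ++ "." ++ PySem.Int.toStr v) else [])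
          = ((PySem.List.pyRange (x + 1) y 1).filter
              (fun v => !((x :: y :: r).contains v))).map (fun v => major ++ "." ++ PySem.Int.toStr v) := by
        have hfe : (PySem.List.pyRange (x + 1) y 1).filter (fun v => !((x :: y :: r).contains v))
            = PySem.List.pyRange (x + 1) y 1 := by
          apply List.filter_eq_self.mpr
          intro v hv
          have hv' := PySem.List.mem_pyRange_one.mp hv
          simp
          refine ⟨by omega, by omega, fun hm => absurd (hyr v hm) (by omega)⟩
        rw [hfe]
        split_ifs with hgt
        · rfl
        · rw [PySem.List.pyRange_one_eq_nil (show y ≤ x + 1 by omega)]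
          rfl
      rw [hif, ← List.map_append, ← List.filter_append]
      congr 1
      rcases lt_or_eq_of_le hxy with hlt | rfl
      · have hsplit : PySem.List.pyRange (x + 1) ((y :: r).getLast (List.cons_ne_nil y r)) 1
            = PySem.List.pyRange (x + 1) y 1 ++ PySem.List.pyRange y ((y :: r).getLast (List.cons_ne_nil y r)) 1 :=
          PySem.List.pyRange_one_append _ _ _ (by omega) (by omega)
        rw [List.filter_append, hsplit, List.filter_append]
        congr 1
        rcases lt_or_eq_of_le hyL with hltL | hEq
        · rw [PySem.List.pyRange_one_cons hltL, List.filter_cons]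
          simp
        · rw [← hEq, PySem.List.pyRange_one_eq_nil (show y ≤ y + 1 by omega),
              PySem.List.pyRange_one_eq_nil (le_refl y)]
      · rw [PySem.List.pyRange_one_eq_nil (show x ≤ x + 1 by omega)]
        simp

-- per-group agreement, for an arbitrary minor list l
theorem pv_group_eq (major : String) (l : List Int) (gaps : List String) :
    pvGapsB major (PySem.Set.ofList l) gaps =
      (if l.length < 2 then gaps
       else gaps ++ pvGapsScanA major (PySem.List.sorted l (fun x => x) false)) := by
  rcases l with _ | ⟨a, _ | ⟨b, t⟩⟩
  · rfl
  · show (PySem.List.pyRange (a + 1) a 1).foldl _ gaps = gaps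
    rw [PySem.List.pyRange_one_eq_nil (show a ≤ a + 1 by omega)]
    rfl
  · -- l = a :: b :: t, length ≥ 2
    rw [if_neg (by simp)]
    set l := a :: b :: t with hldef
    have hlne : l ≠ [] := by simp [hldef]
    -- min and max exist
    cases hmin : PySem.List.min? (PySem.Set.ofList l) (fun x => x) with
    | none =>
        exfalso
        have := (PySem.List.min?_eq_none_iff _ _).mp hmin
        have : a ∈ PySem.Set.ofList l := (PySem.Set.mem_ofList _ _).mpr (by simp [hldef])
        simp_all
    | some lo =>
    cases hmax : PySem.List.max? (PySem.Set.ofList l) (fun x => x) with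
    | none =>
        exfalso
        have := (PySem.List.max?_eq_none_iff _ _).mp hmax
        have : a ∈ PySem.Set.ofList l := (PySem.Set.mem_ofList _ _).mpr (by simp [hldef])
        simp_all
    | some hi =>
    have hB : pvGapsB major (PySem.Set.ofList l) gaps =
        (PySem.List.pyRange (lo + 1) hi 1).foldl (fun gaps v =>
          if PySem.Set.contains (PySem.Set.ofList l) v then gaps
          else gaps ++ [major ++ "." ++ PySem.Int.toStr v]) gaps := by
      unfold pvGapsB
      rw [hmin, hmax]
    rw [hB, pv_gapsB_foldl]
    -- the sorted list
    have hsne : PySem.List.sorted l (fun x => x) false ≠ [] := by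
      rw [Ne, PySem.List.sorted_eq_nil_iff]
      exact hlne
    obtain ⟨m, u, hsu⟩ : ∃ m u, PySem.List.sorted l (fun x => x) false = m :: u := by
      cases hs : PySem.List.sorted l (fun x => x) false with
      | nil => exact absurd hs hsne
      | cons m u => exact ⟨m, u, rfl⟩
    have hpw : (m :: u).Pairwise (· ≤ ·) := by
      have := PySem.List.sorted_pairwise l (fun x => x)
      rw [hsu] at this
      simpa using this
    -- head = lo
    have hmlo : m = lo := by
      have h1 : ∀ y ∈ l, m ≤ y := by
        have := PySem.List.key_head_sorted_le l (fun x => x) hsu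
        simpa using this
      have h2 : ∀ y ∈ PySem.Set.ofList l, lo ≤ y := by
        have := PySem.List.min?_isMin hmin
        simpa using this
      have hm_mem : m ∈ l := by
        have : m ∈ PySem.List.sorted l (fun x => x) false := by rw [hsu]; simp
        exact (PySem.List.mem_sorted _ _ _ _).mp this
      have hlo_mem : lo ∈ l := (PySem.Set.mem_ofList _ _).mp (PySem.List.min?_mem hmin)
      exact le_antisymm (h1 lo hlo_mem) (h2 m ((PySem.Set.mem_ofList _ _).mpr hm_mem))
    -- last = hi
    have hlast : (m :: u).getLast (List.cons_ne_nil m u) = hi := by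
      have hlast_mem : (m :: u).getLast (List.cons_ne_nil m u) ∈ l := by
        apply (PySem.List.mem_sorted l (fun x => x) false _).mp
        rw [hsu]
        exact List.getLast_mem _
      have h1 : ∀ y ∈ PySem.Set.ofList l, y ≤ hi := by
        have := PySem.List.max?_isMax hmax
        simpa using this
      have hhi_mem : hi ∈ m :: u := by
        rw [← hsu]
        exact (PySem.List.mem_sorted _ _ _ _).mpr ((PySem.Set.mem_ofList _ _).mp (PySem.List.max?_mem hmax))
      exact le_antisymm
        (h1 _ ((PySem.Set.mem_ofList _ _).mpr hlast_mem))
        (pv_le_getLast _ hpw _ _ hhi_mem)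
    -- put it together via pv_scan_core
    rw [hsu, pv_scan_core major u m hpw, hlast, ← hmlo]
    congr 1
    refine congrArg _ ?_
    apply List.filter_congr
    intro v _
    have : PySem.Set.contains (PySem.Set.ofList l) v = (m :: u).contains v := by
      show List.contains (PySem.Set.ofList l) v = _
      cases hc : (m :: u).contains v with
      | true =>
          have : v ∈ m :: u := by simpa using hc
          rw [← hsu] at this
          have : v ∈ PySem.Set.ofList l := (PySem.Set.mem_ofList _ _).mpr ((PySem.List.mem_sorted _ _ _ _).mp this)
          simpa using this
      | false =>
          have hnm : v ∉ m :: u := by simpa using hc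
          rw [← hsu] at hnm
          have : v ∉ PySem.Set.ofList l := by
            rw [PySem.Set.mem_ofList]
            exact fun hmem => hnm ((PySem.List.mem_sorted _ _ _ _).mpr hmem)
          simpa using this
    rw [this]

theorem pv_main (codes : List String) :
    find_sequential_gaps_py codes = find_sequential_gaps_py_alt codes := by
  show PySem.List.slice ((codes.foldl pvGroupA PySem.Dict.empty).items.foldl (fun gaps p =>
      if p.2.length < 2 then gaps
      else gaps ++ pvGapsScanA p.1 (PySem.List.sorted p.2 (fun x => x) false)) []) none (some 10)
    = PySem.List.slice ((codes.foldl pvGroupB PySem.Dict.empty).items.foldl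
        (fun gaps p => pvGapsB p.1 p.2 gaps) []) none (some 10)
  have hrel : pvRel (codes.foldl pvGroupA PySem.Dict.empty) (codes.foldl pvGroupB PySem.Dict.empty) :=
    pvRel_fold codes _ _ rfl
  unfold pvRel at hrel
  rw [hrel, List.foldl_map]
  have hfun : (fun (gaps : List String) (p : String × List Int) =>
        pvGapsB p.1 (PySem.Set.ofList p.2) gaps)
      = (fun (gaps : List String) (p : String × List Int) =>
        if p.2.length < 2 then gaps
        else gaps ++ pvGapsScanA p.1 (PySem.List.sorted p.2 (fun x => x) false)) := by
    funext gaps p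
    exact pv_group_eq p.1 p.2 gaps
  rw [hfun]

-- ===== VERDICT (by name: the statement is the Claim_ definition above) =====
theorem find_sequential_gaps_py_spec : Claim_equal_find_sequential_gaps_py := by
  intro codes _h
  unfold Spec_find_sequential_gaps_py
  exact pv_main codes
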